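-- pv_equiv track=rewrite | github.com/Holicklis/ChineseCheckerRobot | detection_script/detection_no_trackbars.py | group_cells_by_row
-- ===== SOURCE A (Python) =====
-- def group_cells_by_row(cells, row_threshold=15):
--     """
--     Group cells (x, y) into rows if their y-coordinates
--     are within 'row_threshold' of each other.
--
--     1. Sort by ascending y (then x as a tiebreaker).
--     2. Start a new row when the y-difference is bigger than 'row_threshold'.
--     3. Sort each row by x ascending.
--     4. Return the grouped cells (flattened back into a single list,
--        but now row-by-row).
--     """
--     if not cells:
--         return []
--
--     # 1) Sort by y (then x as a tiebreaker)
--     sorted_cells = sorted(cells, key=lambda c: (c[1], c[0]))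
--
--     rows = []       # list of lists
--     current_row = [sorted_cells[0]]
--     prev_y = sorted_cells[0][1]
--
--     # 2) Walk through sorted cells
--     for i in range(1, len(sorted_cells)):
--         (x, y) = sorted_cells[i]
--         # If this cell's y is close enough to the previous cell's y,
--         # treat them as the same row
--         if abs(y - prev_y) <= row_threshold:
--             current_row.append((x, y))
--         else:
--             # We start a new "row"
--             rows.append(current_row)
--             current_row = [(x, y)]
--         prev_y = y
--
--     # Add the final row
--     if current_row:
--         rows.append(current_row)
--
--     # 3) Sort each row by x
--     for row in rows:
--         row.sort(key=lambda c: c[0])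
--
--     # 4) Flatten back into a single list
--     grouped_sorted_cells = []
--     for row in rows:
--         grouped_sorted_cells.extend(row)
--
--     return grouped_sorted_cells
-- ===== SOURCE B (Python) =====
-- def group_cells_by_row(cells, row_threshold=15):
--     # Recursive decomposition: presort by (y, x); repeatedly split off the
--     # leading chain (up to the first y-gap > row_threshold) and emit it with a
--     # single (x, y)-keyed sort.  Within a chain the (y, x) presort makes the
--     # stable x-sort coincide with sorting by the full (x, y) key.
--     def emit(s):
--         if not s:
--             return []
--         j = 1
--         while j < len(s) and abs(s[j][1] - s[j - 1][1]) <= row_threshold: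
--             j += 1
--         return sorted(s[:j], key=lambda c: (c[0], c[1])) + emit(s[j:])
--     return emit(sorted(cells, key=lambda c: (c[1], c[0])))
-- ===== Notes on version B (the rewrite author's own statement) =====
-- stated objective: alternative
-- what changed: A accumulates rows into a list-of-lists with a chained prev_y loop, stably sorts each row by x, then flattens; B instead recursively splits the presorted list at the first y-gap exceeding the threshold and emits each chain with one (x,y)-keyed sort, with no row containers, no stable per-row x-sort and no flatten pass (correct because the (y,x) presort makes the stable x-sort agree with the (x,y) sort).
import Mathlib
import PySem

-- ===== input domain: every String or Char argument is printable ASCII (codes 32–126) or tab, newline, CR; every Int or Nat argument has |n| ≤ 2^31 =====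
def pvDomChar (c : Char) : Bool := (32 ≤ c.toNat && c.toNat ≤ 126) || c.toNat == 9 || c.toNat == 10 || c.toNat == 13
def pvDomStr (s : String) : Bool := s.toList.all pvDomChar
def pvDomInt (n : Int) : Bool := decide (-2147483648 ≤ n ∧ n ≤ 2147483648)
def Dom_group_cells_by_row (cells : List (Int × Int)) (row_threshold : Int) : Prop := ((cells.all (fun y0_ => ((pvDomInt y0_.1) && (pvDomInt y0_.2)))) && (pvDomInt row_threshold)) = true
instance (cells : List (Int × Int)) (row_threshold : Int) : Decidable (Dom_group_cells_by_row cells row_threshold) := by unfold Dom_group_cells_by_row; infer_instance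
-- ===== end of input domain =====

-- B replaces A's accumulate-rows/sort-each-row/flatten pipeline by a recursive split of the
-- (y,x)-presorted list at the first y-gap, emitting each chain with one (x,y)-keyed sort;
-- objective: alternative decomposition.

-- ===== PORT A =====
def group_cells_by_row (cells : List (Int × Int)) (row_threshold : Int) : List (Int × Int) :=
  match cells with
  | [] => []
  | _ :: _ =>
    match PySem.List.sorted2 cells (fun c => c.2) (fun c => c.1) with
    | [] => []   -- unreachable: sorted2 of a nonempty list is nonempty
    | c0 :: rest =>
      let st := rest.foldl
        (fun (st : List (List (Int × Int)) × List (Int × Int) × Int) c =>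
          if |c.2 - st.2.2| ≤ row_threshold then
            (st.1, st.2.1 ++ [c], c.2)
          else
            (st.1 ++ [st.2.1], [c], c.2))
        ([], [c0], c0.2)
      let rows := if st.2.1 = [] then st.1 else st.1 ++ [st.2.1]
      let rows := rows.map (fun r => PySem.List.sorted r (fun c => c.1))
      rows.foldl (fun acc r => acc ++ r) []

-- ===== PORT B =====
-- the inner while loop of Source B's emit: length of the chained prefix of cs reachable from prev
def pvGapLen (t prev : Int) : List (Int × Int) → Nat
  | [] => 0
  | c :: cs => if |c.2 - prev| ≤ t then pvGapLen t c.2 cs + 1 else 0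

-- Source B's recursive emit; s[:j] with j = 1 + pvGapLen … is c0 :: cs.take …, s[j:] is cs.drop …
def pvEmit (t : Int) : List (Int × Int) → List (Int × Int)
  | [] => []
  | c0 :: cs =>
    PySem.List.sorted2 (c0 :: cs.take (pvGapLen t c0.2 cs)) (fun c => c.1) (fun c => c.2)
      ++ pvEmit t (cs.drop (pvGapLen t c0.2 cs))
termination_by l => l.length
decreasing_by simp only [List.length_drop, List.length_cons]; omega

def group_cells_by_row_alt (cells : List (Int × Int)) (row_threshold : Int) : List (Int × Int) :=
  pvEmit row_threshold (PySem.List.sorted2 cells (fun c => c.2) (fun c => c.1))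

-- ===== PRECONDITION & SPEC =====
def Spec_group_cells_by_row (cells : List (Int × Int)) (row_threshold : Int) (out : List (Int × Int)) : Prop := out = group_cells_by_row_alt cells row_threshold
instance (cells : List (Int × Int)) (row_threshold : Int) (out : List (Int × Int)) : Decidable (Spec_group_cells_by_row cells row_threshold out) := by unfold Spec_group_cells_by_row; infer_instance

-- ===== CLAIM (what is proved, stated in full; the proofs are below) =====
def Claim_equal_group_cells_by_row : Prop := ∀ (cells : List (Int × Int)) (row_threshold : Int), Dom_group_cells_by_row cells row_threshold → Spec_group_cells_by_row cells row_threshold (group_cells_by_row cells row_threshold)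

-- ===== LEMMAS AND PROOFS =====

-- the "before" Booleans of the three sorts involved
def beforeYX (a b : Int × Int) : Bool := decide (a.2 < b.2) || (!decide (b.2 < a.2) && decide (a.1 < b.1))
def beforeXY (a b : Int × Int) : Bool := decide (a.1 < b.1) || (!decide (b.1 < a.1) && decide (a.2 < b.2))
def beforeX (a b : Int × Int) : Bool := decide (a.1 < b.1)

-- (y,x)-lexicographic ≤, the order sorted2 _ (·.2) (·.1) leaves the list in
def lexYX (a b : Int × Int) : Prop := a.2 < b.2 ∨ (a.2 = b.2 ∧ a.1 ≤ b.1)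

theorem insertBy_congr {α : Type} (f g : α → α → Bool) (c : α) (acc : List α)
    (h : ∀ y ∈ acc, f c y = g c y) :
    PySem.List.insertBy f c acc = PySem.List.insertBy g c acc := by
  induction acc with
  | nil => rfl
  | cons y ys ih =>
    simp only [PySem.List.insertBy, h y (by simp)]
    split_ifs with hy
    · rfl
    · exact congrArg (y :: ·) (ih (fun z hz => h z (by simp [hz])))

theorem foldl_insertBy_congr {α : Type} (f g : α → α → Bool) (l : List α) :
    ∀ acc : List α, l.Pairwise (fun y c => f c y = g c y) →
    (∀ y ∈ acc, ∀ c ∈ l, f c y = g c y) →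
    l.foldl (fun acc x => PySem.List.insertBy f x acc) acc
      = l.foldl (fun acc x => PySem.List.insertBy g x acc) acc := by
  induction l with
  | nil => intro acc _ _; rfl
  | cons c l ih =>
    intro acc hp hacc
    simp only [List.foldl_cons,
      insertBy_congr f g c acc (fun y hy => hacc y hy c (by simp))]
    exact ih _ (List.Pairwise.of_cons hp) (by
      intro y hy c' hc'
      rcases (PySem.List.mem_insertBy _ _ _ _).1 hy with rfl | hy
      · exact (List.pairwise_cons.1 hp).1 c' hc'
      · exact hacc y hy c' (by simp [hc']))

-- on a (y,x)-lex-nondecreasing list, Python's stable x-sort IS the (x,y)-keyed sort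
theorem sortedX_eq_sorted2XY (seg : List (Int × Int)) (h : seg.Pairwise lexYX) :
    PySem.List.sorted seg (fun c => c.1)
      = PySem.List.sorted2 seg (fun c => c.1) (fun c => c.2) := by
  show seg.foldl (fun acc x => PySem.List.insertBy beforeX x acc) []
      = seg.foldl (fun acc x => PySem.List.insertBy beforeXY x acc) []
  refine foldl_insertBy_congr beforeX beforeXY seg [] ?_ (by simp)
  refine h.imp ?_
  intro y c hyc
  have hne : ¬ (c.2 < y.2) := by rcases hyc with h1 | ⟨h1, _⟩ <;> omega
  simp [beforeX, beforeXY, hne]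

theorem insertBy_YX_pairwise (c : Int × Int) (acc : List (Int × Int))
    (h : acc.Pairwise lexYX) :
    (PySem.List.insertBy beforeYX c acc).Pairwise lexYX := by
  induction acc with
  | nil => simp [PySem.List.insertBy]
  | cons y ys ih =>
    rcases List.pairwise_cons.1 h with ⟨hy, hys⟩
    simp only [PySem.List.insertBy]
    split_ifs with hb
    · have hcy : lexYX c y := by
        simp only [beforeYX, Bool.or_eq_true, Bool.and_eq_true, Bool.not_eq_true',
          decide_eq_true_eq, decide_eq_false_iff_not] at hb
        unfold lexYX; omega
      refine List.pairwise_cons.2 ⟨?_, h⟩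
      intro z hz
      rcases List.mem_cons.1 hz with rfl | hz
      · exact hcy
      · have := hy z hz
        unfold lexYX at *; omega
    · have hyc : lexYX y c := by
        simp only [beforeYX, Bool.or_eq_true, Bool.and_eq_true, Bool.not_eq_true',
          decide_eq_true_eq, decide_eq_false_iff_not, not_or, not_and] at hb
        unfold lexYX; omega
      refine List.pairwise_cons.2 ⟨?_, ih hys⟩
      intro z hz
      rcases (PySem.List.mem_insertBy _ _ _ _).1 hz with rfl | hz
      · exact hyc
      · exact hy z hz

theorem sorted2YX_pairwise (xs : List (Int × Int)) :
    (PySem.List.sorted2 xs (fun c => c.2) (fun c => c.1)).Pairwise lexYX := by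
  show (xs.foldl (fun acc x => PySem.List.insertBy beforeYX x acc) []).Pairwise lexYX
  have : ∀ acc : List (Int × Int), acc.Pairwise lexYX →
      (xs.foldl (fun acc x => PySem.List.insertBy beforeYX x acc) acc).Pairwise lexYX := by
    induction xs with
    | nil => intro acc hacc; exact hacc
    | cons c cs ih =>
      intro acc hacc
      exact ih _ (insertBy_YX_pairwise c acc hacc)
  exact this [] (by simp)

-- the chain segments of a list: mirror of pvEmit without the sorting
def pvSegs (t : Int) : List (Int × Int) → List (List (Int × Int))
  | [] => []
  | c0 :: cs => (c0 :: cs.take (pvGapLen t c0.2 cs)) :: pvSegs t (cs.drop (pvGapLen t c0.2 cs))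
termination_by l => l.length
decreasing_by simp only [List.length_drop, List.length_cons]; omega

theorem pvEmit_eq_segs (t : Int) (l : List (Int × Int)) :
    pvEmit t l
      = ((pvSegs t l).map (fun r => PySem.List.sorted2 r (fun c => c.1) (fun c => c.2))).flatten := by
  induction l using pvSegs.induct t with
  | case1 => simp [pvEmit, pvSegs]
  | case2 c0 cs ih => simp only [pvEmit, pvSegs, List.map_cons, List.flatten_cons, ih]

theorem pvSegs_sublist (t : Int) (l : List (Int × Int)) :
    ∀ r ∈ pvSegs t l, r.Sublist l := by
  induction l using pvSegs.induct t with
  | case1 => simp [pvSegs]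
  | case2 c0 cs ih =>
    intro r hr
    simp only [pvSegs, List.mem_cons] at hr
    rcases hr with rfl | hr
    · exact List.cons_sublist_cons.2 (List.take_sublist _ _)
    · exact (ih r hr).trans ((List.drop_sublist _ _).trans (List.sublist_cons_self _ _))

-- A's loop body, named for the invariant lemma
def stepA (t : Int) (st : List (List (Int × Int)) × List (Int × Int) × Int) (c : Int × Int) :
    List (List (Int × Int)) × List (Int × Int) × Int :=
  if |c.2 - st.2.2| ≤ t then (st.1, st.2.1 ++ [c], c.2) else (st.1 ++ [st.2.1], [c], c.2)

-- what A's loop appends after an open row cur with last y = prev, as rows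
def consume (t : Int) : List (Int × Int) → Int → List (Int × Int) → List (List (Int × Int))
  | cur, _, [] => [cur]
  | cur, prev, c :: cs =>
      if |c.2 - prev| ≤ t then consume t (cur ++ [c]) c.2 cs else cur :: consume t [c] c.2 cs

theorem foldA_consume (t : Int) (rest : List (Int × Int)) :
    ∀ (rows : List (List (Int × Int))) (cur : List (Int × Int)) (prev : Int),
      cur ≠ [] →
      (rest.foldl (stepA t) (rows, cur, prev)).2.1 ≠ [] ∧
      (rest.foldl (stepA t) (rows, cur, prev)).1 ++ [(rest.foldl (stepA t) (rows, cur, prev)).2.1]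
        = rows ++ consume t cur prev rest := by
  induction rest with
  | nil => intro rows cur prev hcur; exact ⟨hcur, rfl⟩
  | cons c cs ih =>
    intro rows cur prev hcur
    simp only [List.foldl_cons, stepA]
    by_cases h : |c.2 - prev| ≤ t
    · simp only [h, if_true, consume]
      exact ih rows (cur ++ [c]) c.2 (by simp)
    · simp only [h, if_false, consume]
      obtain ⟨h1, h2⟩ := ih (rows ++ [cur]) [c] c.2 (by simp)
      exact ⟨h1, by rw [h2]; simp⟩

theorem consume_eq_segs (t : Int) (rest : List (Int × Int)) :
    ∀ (cur : List (Int × Int)) (prev : Int),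
      consume t cur prev rest
        = (cur ++ rest.take (pvGapLen t prev rest)) :: pvSegs t (rest.drop (pvGapLen t prev rest)) := by
  induction rest with
  | nil => intro cur prev; simp [consume, pvGapLen, pvSegs]
  | cons c cs ih =>
    intro cur prev
    by_cases h : |c.2 - prev| ≤ t
    · simp only [consume, h, if_true, pvGapLen, ih (cur ++ [c]) c.2, List.take_succ_cons,
        List.drop_succ_cons, List.append_assoc, List.cons_append, List.nil_append]
    · simp only [consume, h, if_false, pvGapLen, List.take_zero, List.drop_zero,
        List.append_nil, pvSegs, ih [c] c.2, List.cons_append, List.nil_append]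

theorem consume_head_eq_segs (t : Int) (c0 : Int × Int) (rest : List (Int × Int)) :
    consume t [c0] c0.2 rest = pvSegs t (c0 :: rest) := by
  rw [consume_eq_segs]
  simp [pvSegs]

theorem sorted2_ne_nil (cells : List (Int × Int)) (h : cells ≠ []) :
    PySem.List.sorted2 cells (fun c => c.2) (fun c => c.1) ≠ [] := by
  intro hnil
  have hp := PySem.List.sorted2_perm cells (fun c => c.2) (fun c => c.1) false
  rw [hnil] at hp
  exact h hp.symm.eq_nil

-- ===== VERDICT (by name: the statement is the Claim_ definition above) =====
theorem group_cells_by_row_spec : Claim_equal_group_cells_by_row := by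
  intro cells t _
  show group_cells_by_row cells t = group_cells_by_row_alt cells t
  cases cells with
  | nil =>
    simp only [group_cells_by_row, group_cells_by_row_alt]
    show ([] : List (Int × Int)) = pvEmit t []
    simp [pvEmit]
  | cons c cs =>
    rcases hs : PySem.List.sorted2 (c :: cs) (fun c => c.2) (fun c => c.1) with _ | ⟨c0, rest⟩
    · exact absurd hs (sorted2_ne_nil _ (by simp))
    · simp only [group_cells_by_row, group_cells_by_row_alt, hs]
      have hA0 : (fun (st : List (List (Int × Int)) × List (Int × Int) × Int) (c : Int × Int) =>
            if |c.2 - st.2.2| ≤ t then ((st.1, st.2.1 ++ [c], c.2) :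
              List (List (Int × Int)) × List (Int × Int) × Int)
            else (st.1 ++ [st.2.1], [c], c.2)) = stepA t := by
        funext st c
        simp [stepA]
      rw [hA0]
      obtain ⟨hne, hrows⟩ := foldA_consume t rest [] [c0] c0.2 (by simp)
      rw [if_neg hne, hrows, List.nil_append, consume_head_eq_segs,
        PySem.List.foldl_append_eq_flatten, List.nil_append, pvEmit_eq_segs]
      congr 1
      refine List.map_congr_left ?_
      intro r hr
      refine sortedX_eq_sorted2XY r ?_
      have hsub : r.Sublist (PySem.List.sorted2 (c :: cs) (fun c => c.2) (fun c => c.1)) := by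
        rw [hs]; exact pvSegs_sublist t (c0 :: rest) r hr
      exact (sorted2YX_pairwise (c :: cs)).sublist hsub
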